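-- pv_equiv track=rewrite | github.com/zeppeki/project-euler-first100 | problems/problem_098.py | get_letter_mapping
-- ===== SOURCE A (Python) =====
-- def get_letter_mapping(
--     word1: str, word2: str, num1: int, num2: int
-- ) -> dict[str, str] | None:
--     """
--     2つの単語と数字から文字→数字のマッピングを取得
--     制約をチェックして有効なマッピングのみ返す
--     時間計算量: O(m) where m is word length
--     空間計算量: O(m)
--     """
--     str1, str2 = str(num1), str(num2)
--
--     # Length must match - both words and both numbers must have same length
--     if len(word1) != len(word2) or len(word1) != len(str1) or len(word2) != len(str2):
--         return None
--
--     # Check for leading zeros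
--     if str1[0] == "0" or str2[0] == "0":
--         return None
--
--     # Build mapping from both words
--     letter_to_digit: dict[str, str] = {}
--     digit_to_letter: dict[str, str] = {}
--
--     # Check word1 -> num1 mapping
--     for letter, digit in zip(word1, str1, strict=False):
--         if letter in letter_to_digit:
--             if letter_to_digit[letter] != digit:
--                 return None  # Inconsistent mapping
--         else:
--             if digit in digit_to_letter and digit_to_letter[digit] != letter:
--                 return None  # One digit maps to multiple letters
--             letter_to_digit[letter] = digit
--             digit_to_letter[digit] = letter
--
--     # Check word2 -> num2 mapping (must be consistent)
--     for letter, digit in zip(word2, str2, strict=False):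
--         if letter in letter_to_digit:
--             if letter_to_digit[letter] != digit:
--                 return None  # Inconsistent mapping
--         else:
--             if digit in digit_to_letter and digit_to_letter[digit] != letter:
--                 return None  # One digit maps to multiple letters
--             letter_to_digit[letter] = digit
--             digit_to_letter[digit] = letter
--
--     return letter_to_digit
-- ===== SOURCE B (Python) =====
-- def get_letter_mapping(word1, word2, num1, num2):
--     """Construct-then-verify: build the mapping in one pass, then check the
--     two global invariants (consistency, injectivity) instead of inline early exits."""
--     str1, str2 = str(num1), str(num2)
--
--     if len(word1) != len(word2) or len(word1) != len(str1) or len(word2) != len(str2):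
--         return None
--     if str1[0] == "0" or str2[0] == "0":
--         return None
--
--     pairs = list(zip(word1 + word2, str1 + str2))
--     m = dict(pairs)
--     if any(m[letter] != digit for letter, digit in pairs):
--         return None  # some letter would need two digits
--     if len(set(m.values())) != len(m):
--         return None  # some digit serves two letters
--     return m
-- ===== Notes on version B (the rewrite author's own statement) =====
-- stated objective: simpler
-- what changed: Replaces the two incremental loops that maintain dual letter->digit and digit->letter dicts with early exits by a construct-then-verify pass: build the dict from zipped pairs once, then check consistency with a single all-pairs scan and injectivity by comparing len(set(values)) to len(dict).
import Mathlib
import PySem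

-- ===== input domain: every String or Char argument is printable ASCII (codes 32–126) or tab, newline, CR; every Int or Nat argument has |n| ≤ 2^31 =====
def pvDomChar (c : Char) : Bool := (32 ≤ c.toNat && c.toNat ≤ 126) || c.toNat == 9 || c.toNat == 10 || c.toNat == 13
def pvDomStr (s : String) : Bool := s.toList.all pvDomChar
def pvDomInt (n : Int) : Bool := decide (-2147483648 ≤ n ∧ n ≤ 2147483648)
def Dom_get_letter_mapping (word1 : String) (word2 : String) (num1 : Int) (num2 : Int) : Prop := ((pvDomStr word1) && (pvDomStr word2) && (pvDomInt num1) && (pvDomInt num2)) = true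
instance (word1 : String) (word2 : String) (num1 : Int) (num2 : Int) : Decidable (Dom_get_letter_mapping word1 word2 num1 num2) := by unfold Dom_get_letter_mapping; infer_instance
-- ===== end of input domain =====

-- B replaces A's two incremental loops over dual dicts (with early exits) by a
-- construct-then-verify pass: build the dict once, then check consistency and
-- injectivity globally; same O(m) cost, objective: simpler decomposition.

-- ===== PORT A =====
-- the two identical for-loops of A: walk (letter, digit) pairs maintaining
-- letter_to_digit and digit_to_letter, aborting on an inconsistency
def pvLoopA : List (Char × Char) → PySem.Dict String String → PySem.Dict String String →
    Option (PySem.Dict String String × PySem.Dict String String)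
  | [], ltd, dtl => some (ltd, dtl)
  | (l, d) :: rest, ltd, dtl =>
    match ltd.get? (String.singleton l) with
    | some dd => if dd ≠ String.singleton d then none else pvLoopA rest ltd dtl
    | none =>
      if dtl.contains (String.singleton d) && !(dtl.get? (String.singleton d) == some (String.singleton l)) then
        none
      else
        pvLoopA rest (ltd.insert (String.singleton l) (String.singleton d))
                     (dtl.insert (String.singleton d) (String.singleton l))

def pvCoreA (p1 p2 : List (Char × Char)) : Option (List (String × String)) :=
  match pvLoopA p1 PySem.Dict.empty PySem.Dict.empty with
  | none => none
  | some (ltd, dtl) =>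
    match pvLoopA p2 ltd dtl with
    | none => none
    | some (ltd2, _) => some ltd2.items

def get_letter_mapping (word1 : String) (word2 : String) (num1 : Int) (num2 : Int) : Option (List (String × String)) :=
  let str1 := PySem.Int.toStr num1
  let str2 := PySem.Int.toStr num2
  if PySem.Str.len word1 ≠ PySem.Str.len word2 ∨ PySem.Str.len word1 ≠ PySem.Str.len str1 ∨
      PySem.Str.len word2 ≠ PySem.Str.len str2 then none
  else if PySem.Str.pyGet? str1 0 = some '0' ∨ PySem.Str.pyGet? str2 0 = some '0' then none
  else pvCoreA (List.zip word1.toList str1.toList) (List.zip word2.toList str2.toList)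

-- ===== PORT B =====
-- m = dict(pairs)
def pvBuild (pairs : List (Char × Char)) : PySem.Dict String String :=
  pairs.foldl (fun m p => m.insert (String.singleton p.1) (String.singleton p.2)) PySem.Dict.empty

def pvCoreB (pairs : List (Char × Char)) : Option (List (String × String)) :=
  let m := pvBuild pairs
  if pairs.any (fun p => !(m.get? (String.singleton p.1) == some (String.singleton p.2))) then none
  else if PySem.Set.len (PySem.Set.ofList m.values) ≠ (PySem.Dict.size m : Int) then none
  else some m.items

def get_letter_mapping_alt (word1 : String) (word2 : String) (num1 : Int) (num2 : Int) : Option (List (String × String)) :=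
  let str1 := PySem.Int.toStr num1
  let str2 := PySem.Int.toStr num2
  if PySem.Str.len word1 ≠ PySem.Str.len word2 ∨ PySem.Str.len word1 ≠ PySem.Str.len str1 ∨
      PySem.Str.len word2 ≠ PySem.Str.len str2 then none
  else if PySem.Str.pyGet? str1 0 = some '0' ∨ PySem.Str.pyGet? str2 0 = some '0' then none
  else pvCoreB (List.zip (word1.toList ++ word2.toList) (str1.toList ++ str2.toList))

-- ===== PRECONDITION & SPEC =====
def Spec_get_letter_mapping (word1 : String) (word2 : String) (num1 : Int) (num2 : Int) (out : Option (List (String × String))) : Prop := out = get_letter_mapping_alt word1 word2 num1 num2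
instance (word1 : String) (word2 : String) (num1 : Int) (num2 : Int) (out : Option (List (String × String))) : Decidable (Spec_get_letter_mapping word1 word2 num1 num2 out) := by unfold Spec_get_letter_mapping; infer_instance

-- ===== CLAIM (what is proved, stated in full; the proofs are below) =====
def Claim_equal_get_letter_mapping : Prop := ∀ (word1 : String) (word2 : String) (num1 : Int) (num2 : Int), Dom_get_letter_mapping word1 word2 num1 num2 → Spec_get_letter_mapping word1 word2 num1 num2 (get_letter_mapping word1 word2 num1 num2)

-- ===== LEMMAS AND PROOFS =====

-- proof-side copies of the two cores over (letter, digit) pairs as 1-char Strings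
def psing (p : Char × Char) : String × String := (String.singleton p.1, String.singleton p.2)

def sLoop : List (String × String) → PySem.Dict String String → PySem.Dict String String →
    Option (PySem.Dict String String × PySem.Dict String String)
  | [], ltd, dtl => some (ltd, dtl)
  | (l, d) :: rest, ltd, dtl =>
    match ltd.get? l with
    | some dd => if dd ≠ d then none else sLoop rest ltd dtl
    | none =>
      if dtl.contains d && !(dtl.get? d == some l) then none
      else sLoop rest (ltd.insert l d) (dtl.insert d l)

-- the common mathematical core: one dict, first-wins, aborting on conflicts
def specF : List (String × String) → PySem.Dict String String → Option (PySem.Dict String String)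
  | [], m => some m
  | (l, d) :: rest, m =>
    match m.get? l with
    | some dd => if dd = d then specF rest m else none
    | none => if d ∈ m.values then none else specF rest (m.insert l d)

def fwm (m : PySem.Dict String String) (q : List (String × String)) : PySem.Dict String String :=
  q.foldl (fun m p => m.setdefault p.1 p.2) m

def lwm (m : PySem.Dict String String) (q : List (String × String)) : PySem.Dict String String :=
  q.foldl (fun m p => m.insert p.1 p.2) m

def goodF (q : List (String × String)) : Prop := ∀ a ∈ q, ∀ b ∈ q, a.1 = b.1 → a.2 = b.2
def goodI (q : List (String × String)) : Prop := ∀ a ∈ q, ∀ b ∈ q, a.2 = b.2 → a.1 = b.1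
def compatA (m : PySem.Dict String String) (q : List (String × String)) : Prop :=
  ∀ p ∈ q, (∀ dd, m.get? p.1 = some dd → dd = p.2) ∧ (m.get? p.1 = none → p.2 ∉ m.values)
def wfD (m : PySem.Dict String String) : Prop := m.keys.Nodup ∧ m.values.Nodup
def InvD (ltd dtl : PySem.Dict String String) : Prop :=
  ltd.keys.Nodup ∧ dtl.keys.Nodup ∧ ∀ l d, ltd.get? l = some d ↔ dtl.get? d = some l

theorem loopA_eq_sLoop (pairs : List (Char × Char)) (ltd dtl : PySem.Dict String String) :
    pvLoopA pairs ltd dtl = sLoop (pairs.map psing) ltd dtl := by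
  induction pairs generalizing ltd dtl with
  | nil => rfl
  | cons p rest ih =>
    obtain ⟨l, d⟩ := p
    simp only [pvLoopA, sLoop, List.map, psing]
    cases h : ltd.get? (String.singleton l) with
    | some dd => split_ifs <;> simp [ih]
    | none => split_ifs <;> simp [ih]

theorem mem_values_iff (m : PySem.Dict String String) (h : m.keys.Nodup) (v : String) :
    v ∈ m.values ↔ ∃ k, m.get? k = some v := by
  constructor
  · intro hv
    rw [show m.values = m.items.map Prod.snd from rfl, List.mem_map] at hv
    obtain ⟨p, hp, hpv⟩ := hv
    exact ⟨p.1, by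
      have := PySem.Dict.get?_of_mem_items m (show (p.1, p.2) ∈ m.items from hp) h
      rw [this, hpv]⟩
  · rintro ⟨k, hk⟩
    have := PySem.Dict.mem_items_of_get?_eq_some m hk
    rw [show m.values = m.items.map Prod.snd from rfl, List.mem_map]
    exact ⟨(k, v), this, rfl⟩

theorem get?_inj_of_wf (m : PySem.Dict String String) (h : wfD m) {k₁ k₂ v : String}
    (h1 : m.get? k₁ = some v) (h2 : m.get? k₂ = some v) : k₁ = k₂ := by
  have hitems : m.items.Nodup := h.1.of_map
  have hinj := (List.nodup_map_iff_inj_on hitems).mp h.2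
  have m1 := PySem.Dict.mem_items_of_get?_eq_some m h1
  have m2 := PySem.Dict.mem_items_of_get?_eq_some m h2
  have := hinj (k₁, v) m1 (k₂, v) m2 rfl
  exact congrArg Prod.fst this

theorem insert_existing (m : PySem.Dict String String) (h : m.keys.Nodup) {k v : String}
    (hk : m.get? k = some v) : m.insert k v = m := by
  apply PySem.Dict.ext
  have hcont : m.contains k = true := by
    rw [PySem.Dict.contains_eq_isSome_get?, hk]; rfl
  rw [PySem.Dict.items_insert_of_contains _ _ hcont]
  conv_rhs => rw [← List.map_id m.items]
  apply List.map_congr_left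
  intro p hp
  by_cases hpk : p.1 = k
  · have hg := PySem.Dict.get?_of_mem_items m (show (p.1, p.2) ∈ m.items from hp) h
    rw [hpk, hk] at hg
    have hv : v = p.2 := by injection hg
    simp only [id_eq, if_pos (show (p.1 == k) = true by simp [hpk])]
    rw [← hpk, hv]
  · simp [hpk]

theorem values_insert_fresh (m : PySem.Dict String String) {k : String} (v : String)
    (hk : m.get? k = none) : (m.insert k v).values = m.values ++ [v] := by
  have hcont : m.contains k = false := (PySem.Dict.get?_eq_none_iff_contains m k).mp hk
  rw [show (m.insert k v).values = (m.insert k v).items.map Prod.snd from rfl,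
      PySem.Dict.items_insert_of_not_contains _ _ hcont, List.map_append]
  rfl

theorem inv_insert (ltd dtl : PySem.Dict String String) (hinv : InvD ltd dtl) {l d : String}
    (hl : ltd.get? l = none) (hd : dtl.get? d = none) : InvD (ltd.insert l d) (dtl.insert d l) := by
  obtain ⟨hk1, hk2, hiff⟩ := hinv
  refine ⟨PySem.Dict.nodup_keys_insert _ _ _ hk1, PySem.Dict.nodup_keys_insert _ _ _ hk2, ?_⟩
  intro x y
  rw [PySem.Dict.get?_insert, PySem.Dict.get?_insert]
  by_cases hx : x = l <;> by_cases hy : y = d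
  · rw [if_pos hx, if_pos hy, hx, hy]; simp
  · rw [if_pos hx, if_neg hy]
    constructor
    · intro hsome
      injection hsome with hsome
      exact absurd hsome.symm hy
    · intro hsome
      have h2 := (hiff x y).mpr hsome
      rw [hx, hl] at h2
      exact absurd h2 (by simp)
  · rw [if_neg hx, if_pos hy]
    constructor
    · intro hsome
      have h2 := (hiff x y).mp hsome
      rw [hy, hd] at h2
      exact absurd h2 (by simp)
    · intro hsome
      injection hsome with hsome
      exact absurd hsome.symm hx
  · rw [if_neg hx, if_neg hy]; exact hiff x y

theorem sLoop_spec (q : List (String × String)) (ltd dtl : PySem.Dict String String)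
    (hinv : InvD ltd dtl) :
    (match sLoop q ltd dtl with
     | none => specF q ltd = none
     | some r => specF q ltd = some r.1 ∧ InvD r.1 r.2) := by
  induction q generalizing ltd dtl with
  | nil => exact ⟨rfl, hinv⟩
  | cons p rest ih =>
    obtain ⟨l, d⟩ := p
    obtain ⟨hn1, hn2, hiff⟩ := hinv
    simp only [sLoop, specF]
    cases hget : ltd.get? l with
    | some dd =>
      dsimp only
      by_cases hdd : dd = d
      · rw [if_neg (show ¬ dd ≠ d by simp [hdd]), if_pos hdd]
        exact ih ltd dtl ⟨hn1, hn2, hiff⟩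
      · rw [if_pos hdd]
        dsimp only
        rw [if_neg hdd]
    | none =>
      dsimp only
      cases hd : dtl.get? d with
      | some l' =>
        have hl' : l' ≠ l := by
          intro he
          rw [he] at hd
          exact absurd ((hiff l d).mpr hd) (by simp [hget])
        have hc : (dtl.contains d && !(some l' == some l)) = true := by
          rw [PySem.Dict.contains_eq_isSome_get?, hd]; simp [hl']
        rw [if_pos hc]
        dsimp only
        rw [if_pos (show d ∈ ltd.values from
          (mem_values_iff ltd hn1 d).mpr ⟨l', (hiff l' d).mpr hd⟩)]
      | none =>
        have hc : (dtl.contains d && !((none : Option String) == some l)) = false := by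
          rw [PySem.Dict.contains_eq_isSome_get?, hd]; rfl
        have hnv : d ∉ ltd.values := by
          rw [mem_values_iff ltd hn1 d]
          rintro ⟨k, hk⟩
          have h2 := (hiff k d).mp hk
          rw [hd] at h2
          exact absurd h2 (by simp)
        rw [if_neg (show ¬ (dtl.contains d && !((none : Option String) == some l)) = true by
          rw [PySem.Dict.contains_eq_isSome_get?, hd]; simp), if_neg hnv]
        exact ih _ _ (inv_insert ltd dtl ⟨hn1, hn2, hiff⟩ hget hd)

theorem specF_append (q1 q2 : List (String × String)) (m : PySem.Dict String String) :
    specF (q1 ++ q2) m = (specF q1 m).bind (fun m' => specF q2 m') := by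
  induction q1 generalizing m with
  | nil => rfl
  | cons p rest ih =>
    obtain ⟨l, d⟩ := p
    simp only [List.cons_append, specF]
    cases m.get? l with
    | some dd =>
      by_cases hdd : dd = d
      · simp [hdd, ih]
      · simp [hdd]
    | none =>
      by_cases hv : d ∈ m.values
      · simp [hv]
      · simp [hv, ih]

theorem specF_some (q : List (String × String)) (m : PySem.Dict String String)
    (hwf : wfD m) (hc : compatA m q) (hF : goodF q) (hI : goodI q) :
    specF q m = some (fwm m q) := by
  induction q generalizing m with
  | nil => rfl
  | cons p rest ih =>
    obtain ⟨l, d⟩ := p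
    have hcr : compatA m rest := fun a ha => hc a (List.mem_cons_of_mem _ ha)
    have hFr : goodF rest := fun a ha b hb => hF a (List.mem_cons_of_mem _ ha) b (List.mem_cons_of_mem _ hb)
    have hIr : goodI rest := fun a ha b hb => hI a (List.mem_cons_of_mem _ ha) b (List.mem_cons_of_mem _ hb)
    simp only [specF, fwm, List.foldl_cons]
    cases hget : m.get? l with
    | some dd =>
      dsimp only
      have hdd : dd = d := (hc (l, d) List.mem_cons_self).1 dd hget
      rw [if_pos hdd]
      have hsd : m.setdefault l d = m := PySem.Dict.setdefault_of_contains _ _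
        (by rw [PySem.Dict.contains_eq_isSome_get?, hget]; rfl)
      rw [hsd]
      exact ih m hwf hcr hFr hIr
    | none =>
      dsimp only
      have hnv : d ∉ m.values := (hc (l, d) List.mem_cons_self).2 hget
      rw [if_neg hnv]
      have hcont : m.contains l = false := (PySem.Dict.get?_eq_none_iff_contains m l).mp hget
      rw [PySem.Dict.setdefault_of_not_contains _ _ hcont]
      have hwf' : wfD (m.insert l d) := by
        refine ⟨PySem.Dict.nodup_keys_insert _ _ _ hwf.1, ?_⟩
        rw [values_insert_fresh m d hget, List.nodup_append]
        refine ⟨hwf.2, by simp, ?_⟩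
        intro a ha b hb hab
        rw [List.mem_singleton] at hb
        exact hnv ((hab.trans hb) ▸ ha)
      have hcr' : compatA (m.insert l d) rest := by
        intro p hp
        constructor
        · intro dd hdd
          rw [PySem.Dict.get?_insert] at hdd
          by_cases hpl : p.1 = l
          · rw [if_pos hpl] at hdd
            have hdd2 : dd = d := by injection hdd.symm
            rw [hdd2]
            exact hF (l, d) List.mem_cons_self p (List.mem_cons_of_mem _ hp) hpl.symm
          · rw [if_neg hpl] at hdd
            exact (hcr p hp).1 dd hdd
        · intro hnone hmem
          rw [PySem.Dict.get?_insert] at hnone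
          by_cases hpl : p.1 = l
          · rw [if_pos hpl] at hnone; exact absurd hnone (by simp)
          · rw [if_neg hpl] at hnone
            rw [values_insert_fresh m d hget, List.mem_append] at hmem
            rcases hmem with hmem | hmem
            · exact (hcr p hp).2 hnone hmem
            · have hpd : p.2 = d := by simpa using hmem
              exact hpl (hI p (List.mem_cons_of_mem _ hp) (l, d) List.mem_cons_self hpd)
      exact ih _ hwf' hcr' hFr hIr

theorem specF_none (q : List (String × String)) (m : PySem.Dict String String)
    (hwf : wfD m) (h : ¬ (compatA m q ∧ goodF q ∧ goodI q)) :
    specF q m = none := by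
  induction q generalizing m with
  | nil =>
    exact absurd ⟨fun p hp => absurd hp (List.not_mem_nil),
      fun a ha => absurd ha (List.not_mem_nil), fun a ha => absurd ha (List.not_mem_nil)⟩ h
  | cons p rest ih =>
    obtain ⟨l, d⟩ := p
    simp only [specF]
    cases hget : m.get? l with
    | some dd =>
      dsimp only
      by_cases hdd : dd = d
      · rw [if_pos hdd]
        subst hdd
        apply ih m hwf
        intro ⟨hcr, hFr, hIr⟩
        apply h
        refine ⟨?_, ?_, ?_⟩
        · intro p hp
          rcases List.mem_cons.mp hp with he | hp'
          · subst he
            exact ⟨fun d2 hd2 => by rw [hget] at hd2; injection hd2.symm,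
              fun hn => by rw [hget] at hn; exact absurd hn (by simp)⟩
          · exact hcr p hp'
        · intro a ha b hb hab
          rcases List.mem_cons.mp ha with hea | ha' <;> rcases List.mem_cons.mp hb with heb | hb'
          · rw [hea, heb]
          · subst hea
            exact (hcr b hb').1 dd (by rw [← hab]; exact hget)
          · subst heb
            exact ((hcr a ha').1 dd (by rw [hab]; exact hget)).symm
          · exact hFr a ha' b hb' hab
        · intro a ha b hb hab
          rcases List.mem_cons.mp ha with hea | ha' <;> rcases List.mem_cons.mp hb with heb | hb'
          · rw [hea, heb]
          · subst hea
            cases hgb : m.get? b.1 with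
            | some db =>
              have hdb : db = b.2 := (hcr b hb').1 db hgb
              subst hdb
              rw [← hab] at hgb
              exact get?_inj_of_wf m hwf hget hgb
            | none =>
              exact absurd ((mem_values_iff m hwf.1 b.2).mpr ⟨l, by rw [hget]; exact congrArg some hab⟩)
                ((hcr b hb').2 hgb)
          · subst heb
            cases hga : m.get? a.1 with
            | some da =>
              have hda : da = a.2 := (hcr a ha').1 da hga
              subst hda
              rw [hab] at hga
              exact get?_inj_of_wf m hwf hga hget
            | none =>
              exact absurd ((mem_values_iff m hwf.1 a.2).mpr ⟨l, by rw [hget]; exact (congrArg some hab).symm⟩)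
                ((hcr a ha').2 hga)
          · exact hIr a ha' b hb' hab
      · rw [if_neg hdd]
    | none =>
      dsimp only
      by_cases hv : d ∈ m.values
      · rw [if_pos hv]
      · rw [if_neg hv]
        have hwf' : wfD (m.insert l d) := by
          refine ⟨PySem.Dict.nodup_keys_insert _ _ _ hwf.1, ?_⟩
          rw [values_insert_fresh m d hget, List.nodup_append]
          refine ⟨hwf.2, by simp, ?_⟩
          intro a ha b hb hab
          rw [List.mem_singleton] at hb
          exact hv ((hab.trans hb) ▸ ha)
        apply ih _ hwf'
        intro ⟨hcr, hFr, hIr⟩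
        apply h
        have hvins : d ∈ (m.insert l d).values := by
          rw [values_insert_fresh m d hget]; simp
        refine ⟨?_, ?_, ?_⟩
        · intro p hp
          rcases List.mem_cons.mp hp with he | hp'
          · subst he
            exact ⟨fun d2 hd2 => by rw [hget] at hd2; exact absurd hd2 (by simp),
              fun _ => hv⟩
          · constructor
            · intro dd hdd
              by_cases hpl : p.1 = l
              · have : (m.insert l d).get? p.1 = some d := by
                  rw [PySem.Dict.get?_insert, if_pos hpl]
                have hd2 : d = p.2 := (hcr p hp').1 d this
                rw [hpl, hget] at hdd
                exact absurd hdd (by simp)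
              · apply (hcr p hp').1 dd
                rw [PySem.Dict.get?_insert, if_neg hpl]
                exact hdd
            · intro hnone hmem
              by_cases hpl : p.1 = l
              · have : (m.insert l d).get? p.1 = some d := by
                  rw [PySem.Dict.get?_insert, if_pos hpl]
                have hd2 : d = p.2 := (hcr p hp').1 d this
                rw [← hd2] at hmem
                exact hv hmem
              · have hnone' : (m.insert l d).get? p.1 = none := by
                  rw [PySem.Dict.get?_insert, if_neg hpl]; exact hnone
                apply (hcr p hp').2 hnone'
                rw [values_insert_fresh m d hget]
                exact List.mem_append_left _ hmem
        · intro a ha b hb hab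
          rcases List.mem_cons.mp ha with hea | ha' <;> rcases List.mem_cons.mp hb with heb | hb'
          · rw [hea, heb]
          · subst hea
            apply ((hcr b hb').1 d)
            rw [PySem.Dict.get?_insert, if_pos hab.symm]
          · subst heb
            exact ((hcr a ha').1 d (by rw [PySem.Dict.get?_insert, if_pos hab])).symm
          · exact hFr a ha' b hb' hab
        · intro a ha b hb hab
          rcases List.mem_cons.mp ha with hea | ha' <;> rcases List.mem_cons.mp hb with heb | hb'
          · rw [hea, heb]
          · subst hea
            by_cases hbl : b.1 = l
            · exact hbl.symm
            · cases hgb : (m.insert l d).get? b.1 with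
              | some db =>
                have hdb : db = b.2 := (hcr b hb').1 db hgb
                rw [PySem.Dict.get?_insert, if_neg hbl] at hgb
                rw [hdb, ← hab] at hgb
                exact absurd ((mem_values_iff m hwf.1 d).mpr ⟨b.1, hgb⟩) hv
              | none =>
                exact absurd (show b.2 ∈ (m.insert l d).values by rw [← hab]; exact hvins)
                  ((hcr b hb').2 hgb)
          · subst heb
            by_cases hal : a.1 = l
            · exact hal
            · cases hga : (m.insert l d).get? a.1 with
              | some da =>
                have hda : da = a.2 := (hcr a ha').1 da hga
                rw [PySem.Dict.get?_insert, if_neg hal] at hga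
                rw [hda, hab] at hga
                exact absurd ((mem_values_iff m hwf.1 d).mpr ⟨a.1, hga⟩) hv
              | none =>
                exact absurd (show a.2 ∈ (m.insert l d).values by rw [hab]; exact hvins)
                  ((hcr a ha').2 hga)
          · exact hIr a ha' b hb' hab

theorem lw_get_mem (q : List (String × String)) (m : PySem.Dict String String) (l dd : String)
    (h : (lwm m q).get? l = some dd) : m.get? l = some dd ∨ (l, dd) ∈ q := by
  induction q generalizing m with
  | nil => exact Or.inl h
  | cons p rest ih =>
    rcases ih (m.insert p.1 p.2) h with h' | h'
    · rw [PySem.Dict.get?_insert] at h'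
      by_cases hpl : l = p.1
      · rw [if_pos hpl] at h'
        have : dd = p.2 := by injection h'.symm
        right; rw [hpl, this]; exact List.mem_cons_self
      · rw [if_neg hpl] at h'; exact Or.inl h'
    · exact Or.inr (List.mem_cons_of_mem _ h')

theorem lw_isSome_mono (q : List (String × String)) (m : PySem.Dict String String) (l : String)
    (h : (m.get? l).isSome) : ((lwm m q).get? l).isSome := by
  induction q generalizing m with
  | nil => exact h
  | cons p rest ih =>
    apply ih
    rw [PySem.Dict.get?_insert]
    split_ifs with he
    · rfl
    · exact h

theorem lw_isSome_of_mem (q : List (String × String)) (m : PySem.Dict String String)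
    (p : String × String) (h : p ∈ q) : ((lwm m q).get? p.1).isSome := by
  induction q generalizing m with
  | nil => exact absurd h (List.not_mem_nil)
  | cons p' rest ih =>
    simp only [lwm, List.foldl_cons]
    rcases List.mem_cons.mp h with he | h'
    · subst he
      exact lw_isSome_mono rest _ p.1 (by rw [PySem.Dict.get?_insert, if_pos rfl]; rfl)
    · exact ih _ h'

theorem lw_eq_fw (q : List (String × String)) (m : PySem.Dict String String)
    (h : m.keys.Nodup) (hc : ∀ p ∈ q, ∀ dd, m.get? p.1 = some dd → dd = p.2)
    (hF : goodF q) : lwm m q = fwm m q := by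
  induction q generalizing m with
  | nil => rfl
  | cons p rest ih =>
    obtain ⟨l, d⟩ := p
    have hFr : goodF rest := fun a ha b hb => hF a (List.mem_cons_of_mem _ ha) b (List.mem_cons_of_mem _ hb)
    simp only [lwm, fwm, List.foldl_cons]
    cases hget : m.get? l with
    | some dd =>
      have hdd : dd = d := hc (l, d) List.mem_cons_self dd hget
      subst hdd
      rw [insert_existing m h hget,
        PySem.Dict.setdefault_of_contains _ _ (by rw [PySem.Dict.contains_eq_isSome_get?, hget]; rfl)]
      exact ih m h (fun p hp => hc p (List.mem_cons_of_mem _ hp)) hFr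
    | none =>
      rw [PySem.Dict.setdefault_of_not_contains _ _ ((PySem.Dict.get?_eq_none_iff_contains m l).mp hget)]
      apply ih _ (PySem.Dict.nodup_keys_insert _ _ _ h) _ hFr
      intro p hp dd hdd
      rw [PySem.Dict.get?_insert] at hdd
      by_cases hpl : p.1 = l
      · rw [if_pos hpl] at hdd
        have : dd = d := by injection hdd.symm
        rw [this]
        exact hF (l, d) List.mem_cons_self p (List.mem_cons_of_mem _ hp) hpl.symm
      · rw [if_neg hpl] at hdd
        exact hc p (List.mem_cons_of_mem _ hp) dd hdd

theorem fw_get_iff (q : List (String × String)) (m : PySem.Dict String String)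
    (h : m.keys.Nodup) (hc : ∀ p ∈ q, ∀ dd, m.get? p.1 = some dd → dd = p.2)
    (hF : goodF q) (l dd : String) :
    (fwm m q).get? l = some dd ↔ m.get? l = some dd ∨ (l, dd) ∈ q := by
  induction q generalizing m with
  | nil => simp [fwm]
  | cons p rest ih =>
    obtain ⟨lh, dh⟩ := p
    have hFr : goodF rest := fun a ha b hb => hF a (List.mem_cons_of_mem _ ha) b (List.mem_cons_of_mem _ hb)
    simp only [fwm, List.foldl_cons]
    cases hget : m.get? lh with
    | some ddh =>
      have hddh : ddh = dh := hc (lh, dh) List.mem_cons_self ddh hget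
      subst hddh
      rw [PySem.Dict.setdefault_of_contains _ _ (by rw [PySem.Dict.contains_eq_isSome_get?, hget]; rfl)]
      rw [show (List.foldl (fun m p => m.setdefault p.1 p.2) m rest) = fwm m rest from rfl,
        ih m h (fun p hp => hc p (List.mem_cons_of_mem _ hp)) hFr]
      constructor
      · rintro (h' | h')
        · exact Or.inl h'
        · exact Or.inr (List.mem_cons_of_mem _ h')
      · rintro (h' | h')
        · exact Or.inl h'
        · rcases List.mem_cons.mp h' with he | h''
          · left; rw [show l = lh from congrArg Prod.fst he, show dd = ddh from congrArg Prod.snd he]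
            exact hget
          · exact Or.inr h''
    | none =>
      rw [PySem.Dict.setdefault_of_not_contains _ _ ((PySem.Dict.get?_eq_none_iff_contains m lh).mp hget)]
      have hc' : ∀ p ∈ rest, ∀ dd2, (m.insert lh dh).get? p.1 = some dd2 → dd2 = p.2 := by
        intro p hp dd2 hdd2
        rw [PySem.Dict.get?_insert] at hdd2
        by_cases hpl : p.1 = lh
        · rw [if_pos hpl] at hdd2
          have : dd2 = dh := by injection hdd2.symm
          rw [this]
          exact hF (lh, dh) List.mem_cons_self p (List.mem_cons_of_mem _ hp) hpl.symm
        · rw [if_neg hpl] at hdd2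
          exact hc p (List.mem_cons_of_mem _ hp) dd2 hdd2
      rw [show (List.foldl (fun m p => m.setdefault p.1 p.2) (m.insert lh dh) rest) = fwm (m.insert lh dh) rest from rfl,
        ih _ (PySem.Dict.nodup_keys_insert _ _ _ h) hc' hFr, PySem.Dict.get?_insert]
      by_cases hl : l = lh
      · subst hl
        rw [if_pos rfl]
        constructor
        · rintro (h' | h')
          · have : dd = dh := by injection h'.symm
            rw [this]; exact Or.inr List.mem_cons_self
          · exact Or.inr (List.mem_cons_of_mem _ h')
        · rintro (h' | h')
          · rw [hget] at h'; exact absurd h' (by simp)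
          · rcases List.mem_cons.mp h' with he | h''
            · left; rw [show dd = dh from congrArg Prod.snd he]
            · left
              rw [show dd = dh from hF (l, dd) (List.mem_cons_of_mem _ h'') (l, dh) List.mem_cons_self rfl]
      · rw [if_neg hl]
        constructor
        · rintro (h' | h')
          · exact Or.inl h'
          · exact Or.inr (List.mem_cons_of_mem _ h')
        · rintro (h' | h')
          · exact Or.inl h'
          · rcases List.mem_cons.mp h' with he | h''
            · exact absurd (congrArg Prod.fst he) hl
            · exact Or.inr h''

theorem fw_keys_nodup (q : List (String × String)) (m : PySem.Dict String String)
    (h : m.keys.Nodup) : (fwm m q).keys.Nodup := by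
  induction q generalizing m with
  | nil => exact h
  | cons p rest ih =>
    simp only [fwm, List.foldl_cons]
    by_cases hcont : m.contains p.1 = true
    · rw [PySem.Dict.setdefault_of_contains _ _ hcont]; exact ih m h
    · rw [PySem.Dict.setdefault_of_not_contains _ _ (by simpa using hcont)]
      exact ih _ (PySem.Dict.nodup_keys_insert _ _ _ h)

theorem ofList_length_eq_iff (xs : List String) :
    List.length (PySem.Set.ofList xs) = xs.length ↔ xs.Nodup := by
  induction xs using List.reverseRecOn with
  | nil => simp [PySem.Set.ofList_nil]
  | append_singleton xs x ih =>
    rw [PySem.Set.ofList_append_singleton, PySem.Set.add_eq_ite]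
    have hle := PySem.Set.length_ofList_le xs
    by_cases hx : x ∈ PySem.Set.ofList xs
    · have hxx : x ∈ xs := (PySem.Set.mem_ofList xs x).mp hx
      rw [if_pos hx]
      simp only [List.length_append, List.length_singleton]
      constructor
      · intro he; omega
      · intro hnd
        rw [List.nodup_append] at hnd
        exact (hnd.2.2 x hxx x List.mem_cons_self rfl).elim
    · have hxx : x ∉ xs := fun hmem => hx ((PySem.Set.mem_ofList xs x).mpr hmem)
      rw [if_neg hx]
      simp only [List.length_append, List.length_singleton]
      rw [List.nodup_append]
      constructor
      · intro he
        refine ⟨ih.mp (by omega), by simp, ?_⟩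
        intro a ha b hb hab
        rw [List.mem_singleton] at hb
        exact hxx ((hab.trans hb) ▸ ha)
      · rintro ⟨hnd, -, -⟩
        rw [ih.mpr hnd]

theorem inv_empty : InvD PySem.Dict.empty PySem.Dict.empty := by
  refine ⟨?_, ?_, ?_⟩
  · simp [PySem.Dict.keys, PySem.Dict.empty]
  · simp [PySem.Dict.keys, PySem.Dict.empty]
  · intro l d
    rw [PySem.Dict.get?_empty, PySem.Dict.get?_empty]
    simp

theorem wf_empty : wfD (PySem.Dict.empty : PySem.Dict String String) := by
  constructor
  · simp [PySem.Dict.keys, PySem.Dict.empty]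
  · simp [PySem.Dict.values, PySem.Dict.empty]

theorem compat_empty (q : List (String × String)) : compatA PySem.Dict.empty q := by
  intro p hp
  constructor
  · intro dd hdd
    rw [PySem.Dict.get?_empty] at hdd
    cases hdd
  · intro _ hm
    simp [PySem.Dict.values, PySem.Dict.empty] at hm

theorem big_step (q : List (String × String)) :
    (specF q PySem.Dict.empty).map PySem.Dict.items =
      (if q.any (fun p => !((lwm PySem.Dict.empty q).get? p.1 == some p.2)) then none
       else if PySem.Set.len (PySem.Set.ofList (lwm PySem.Dict.empty q).values)
           ≠ ((PySem.Dict.size (lwm PySem.Dict.empty q)) : Int) then none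
       else some (lwm PySem.Dict.empty q).items) := by
  by_cases hF : goodF q
  · have hall : ∀ p ∈ q, (lwm PySem.Dict.empty q).get? p.1 = some p.2 := by
      intro p hp
      have hs := lw_isSome_of_mem q PySem.Dict.empty p hp
      obtain ⟨dd, hdd⟩ := Option.isSome_iff_exists.mp hs
      rcases lw_get_mem q PySem.Dict.empty p.1 dd hdd with h' | h'
      · rw [PySem.Dict.get?_empty] at h'; cases h'
      · rw [hdd]
        exact congrArg some (hF (p.1, dd) h' p hp rfl)
    have hany : q.any (fun p => !((lwm PySem.Dict.empty q).get? p.1 == some p.2)) = false := by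
      rw [List.any_eq_false]
      intro p hp
      simp [hall p hp]
    have hlf : lwm PySem.Dict.empty q = fwm PySem.Dict.empty q :=
      lw_eq_fw q _ wf_empty.1 (fun p _ dd h => by rw [PySem.Dict.get?_empty] at h; cases h) hF
    have hmk : (fwm PySem.Dict.empty q).keys.Nodup := fw_keys_nodup q _ wf_empty.1
    have hmg : ∀ r : String × String, ((fwm PySem.Dict.empty q).get? r.1 = some r.2 ↔ r ∈ q) := by
      intro r
      have h2 := fw_get_iff q PySem.Dict.empty wf_empty.1
        (fun p _ dd h => by rw [PySem.Dict.get?_empty] at h; cases h) hF r.1 r.2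
      rw [PySem.Dict.get?_empty] at h2
      simp only [Prod.mk.eta] at h2
      rw [h2]
      simp
    rw [hlf] at hany ⊢
    rw [hany]
    simp only [Bool.false_eq_true, if_false]
    by_cases hI : goodI q
    · rw [specF_some q _ wf_empty (compat_empty q) hF hI]
      have hvn : (fwm PySem.Dict.empty q).values.Nodup := by
        have hitems : (fwm PySem.Dict.empty q).items.Nodup := hmk.of_map
        rw [show (fwm PySem.Dict.empty q).values = (fwm PySem.Dict.empty q).items.map Prod.snd from rfl,
          List.nodup_map_iff_inj_on hitems]
        intro a ha b hb hsnd
        have h1 : (fwm PySem.Dict.empty q).get? a.1 = some a.2 :=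
          PySem.Dict.get?_of_mem_items _ (show (a.1, a.2) ∈ _ by rw [Prod.mk.eta]; exact ha) hmk
        have h2 : (fwm PySem.Dict.empty q).get? b.1 = some b.2 :=
          PySem.Dict.get?_of_mem_items _ (show (b.1, b.2) ∈ _ by rw [Prod.mk.eta]; exact hb) hmk
        exact Prod.ext (hI a ((hmg a).mp h1) b ((hmg b).mp h2) hsnd) hsnd
      rw [if_neg]
      · rfl
      · intro hne
        apply hne
        rw [PySem.Set.ofList_eq_self_of_nodup _ hvn]
        show ((fwm PySem.Dict.empty q).values.length : Int) = _
        rw [show (fwm PySem.Dict.empty q).values = (fwm PySem.Dict.empty q).items.map Prod.snd from rfl,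
          List.length_map]
        rfl
    · rw [specF_none q _ wf_empty (fun h => hI h.2.2)]
      have hnn : ¬ (fwm PySem.Dict.empty q).values.Nodup := by
        intro hvn
        apply hI
        intro a ha b hb hab
        have h1 : (fwm PySem.Dict.empty q).get? a.1 = some a.2 := (hmg a).mpr ha
        have h2 : (fwm PySem.Dict.empty q).get? b.1 = some b.2 := (hmg b).mpr hb
        rw [← hab] at h2
        exact get?_inj_of_wf _ ⟨hmk, hvn⟩ h1 h2
      rw [if_pos]
      · rfl
      · have hlt : List.length (PySem.Set.ofList (fwm PySem.Dict.empty q).values)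
            ≠ (fwm PySem.Dict.empty q).values.length :=
          fun he => hnn ((ofList_length_eq_iff _).mp he)
        show PySem.Set.len (PySem.Set.ofList (fwm PySem.Dict.empty q).values) ≠ _
        have hvl : (fwm PySem.Dict.empty q).values.length = PySem.Dict.size (fwm PySem.Dict.empty q) := by
          rw [show (fwm PySem.Dict.empty q).values = (fwm PySem.Dict.empty q).items.map Prod.snd from rfl,
            List.length_map]
          rfl
        show (↑(List.length (PySem.Set.ofList (fwm PySem.Dict.empty q).values)) : Int) ≠ _
        rw [← hvl]
        intro hc
        exact hlt (by exact_mod_cast hc)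
  · rw [specF_none q _ wf_empty (fun h => hF h.2.1)]
    have hany : q.any (fun p => !((lwm PySem.Dict.empty q).get? p.1 == some p.2)) = true := by
      by_contra hfalse
      apply hF
      have hall : ∀ p ∈ q, (lwm PySem.Dict.empty q).get? p.1 = some p.2 := by
        intro p hp
        have h2 := List.any_eq_false.mp (Bool.eq_false_iff.mpr (by
          intro ht; exact hfalse ht)) p hp
        simpa using h2
      intro a ha b hb hab
      have h1 := hall a ha
      have h2 := hall b hb
      rw [hab] at h1
      rw [h1] at h2
      injection h2
    rw [hany]
    simp

theorem core_eq (p1 p2 : List (Char × Char)) : pvCoreA p1 p2 = pvCoreB (p1 ++ p2) := by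
  have hA : pvCoreA p1 p2 = (specF ((p1 ++ p2).map psing) PySem.Dict.empty).map PySem.Dict.items := by
    rw [List.map_append]
    unfold pvCoreA
    rw [loopA_eq_sLoop, specF_append]
    have h1 := sLoop_spec (p1.map psing) PySem.Dict.empty PySem.Dict.empty inv_empty
    cases hs1 : sLoop (p1.map psing) PySem.Dict.empty PySem.Dict.empty with
    | none =>
      rw [hs1] at h1
      rw [h1]
      rfl
    | some r =>
      rw [hs1] at h1
      obtain ⟨he1, hinv1⟩ := h1
      obtain ⟨a, b⟩ := r
      dsimp only
      rw [loopA_eq_sLoop, he1]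
      have h2 := sLoop_spec (p2.map psing) a b hinv1
      cases hs2 : sLoop (p2.map psing) a b with
      | none =>
        rw [hs2] at h2
        simp [h2]
      | some r2 =>
        rw [hs2] at h2
        obtain ⟨he2, -⟩ := h2
        simp [he2]
  have hbuild : pvBuild (p1 ++ p2) = lwm PySem.Dict.empty ((p1 ++ p2).map psing) := by
    simp [pvBuild, lwm, List.foldl_map, psing]
  have hB : pvCoreB (p1 ++ p2) =
      (if ((p1 ++ p2).map psing).any (fun p => !((lwm PySem.Dict.empty ((p1 ++ p2).map psing)).get? p.1 == some p.2)) then none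
       else if PySem.Set.len (PySem.Set.ofList (lwm PySem.Dict.empty ((p1 ++ p2).map psing)).values)
           ≠ ((PySem.Dict.size (lwm PySem.Dict.empty ((p1 ++ p2).map psing))) : Int) then none
       else some (lwm PySem.Dict.empty ((p1 ++ p2).map psing)).items) := by
    unfold pvCoreB
    rw [hbuild, List.any_map]
    rfl
  rw [hA, hB]
  exact big_step _

-- ===== VERDICT (by name: the statement is the Claim_ definition above) =====
theorem get_letter_mapping_spec : Claim_equal_get_letter_mapping := by
  intro word1 word2 num1 num2 _
  unfold Spec_get_letter_mapping get_letter_mapping get_letter_mapping_alt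
  dsimp only
  by_cases h1 : PySem.Str.len word1 ≠ PySem.Str.len word2 ∨
      PySem.Str.len word1 ≠ PySem.Str.len (PySem.Int.toStr num1) ∨
      PySem.Str.len word2 ≠ PySem.Str.len (PySem.Int.toStr num2)
  · rw [if_pos h1, if_pos h1]
  · rw [if_neg h1, if_neg h1]
    by_cases h2 : PySem.Str.pyGet? (PySem.Int.toStr num1) 0 = some '0' ∨
        PySem.Str.pyGet? (PySem.Int.toStr num2) 0 = some '0'
    · rw [if_pos h2, if_pos h2]
    · rw [if_neg h2, if_neg h2]
      have e2 : PySem.Str.len word1 = PySem.Str.len (PySem.Int.toStr num1) := by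
        by_contra hne
        exact h1 (Or.inr (Or.inl hne))
      have hl1 : word1.toList.length = (PySem.Int.toStr num1).toList.length := by
        rw [PySem.Str.len_eq, PySem.Str.len_eq] at e2
        exact_mod_cast e2
      rw [List.zip_append hl1]
      exact core_eq _ _
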